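-- pv_equiv track=rewrite | github.com/OTOYO1020/ChatDev_Intermediate | WareHouse/C_217_DefaultOrganization_20250503054156/main.py | is_valid_permutation
-- ===== SOURCE A (Python) =====
-- def is_valid_permutation(permutation, n):
--     """
--     Validate the permutation to ensure it contains unique values from 1 to N.
--     Parameters:
--     permutation (list): A list of integers representing the permutation.
--     n (int): The expected length of the permutation.
--     Returns:
--     bool: True if valid, False otherwise.
--     """
--     if len(permutation) != n:
--         return False
--     if any(x < 1 or x > n for x in permutation):
--         return False
--     if len(set(permutation)) != n:
--         return False
--     return True
-- ===== SOURCE B (Python) =====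
-- def is_valid_permutation(permutation, n):
--     if len(permutation) != n:
--         return False
--     return sorted(permutation) == list(range(1, n + 1))
-- ===== Notes on version B (the rewrite author's own statement) =====
-- stated objective: idiomatic
-- what changed: Replaced the three separate scans (range check via any, uniqueness via set size) with a single comparison of the sorted input against the canonical list 1..n, which enforces range, uniqueness and coverage at once.
import Mathlib
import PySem

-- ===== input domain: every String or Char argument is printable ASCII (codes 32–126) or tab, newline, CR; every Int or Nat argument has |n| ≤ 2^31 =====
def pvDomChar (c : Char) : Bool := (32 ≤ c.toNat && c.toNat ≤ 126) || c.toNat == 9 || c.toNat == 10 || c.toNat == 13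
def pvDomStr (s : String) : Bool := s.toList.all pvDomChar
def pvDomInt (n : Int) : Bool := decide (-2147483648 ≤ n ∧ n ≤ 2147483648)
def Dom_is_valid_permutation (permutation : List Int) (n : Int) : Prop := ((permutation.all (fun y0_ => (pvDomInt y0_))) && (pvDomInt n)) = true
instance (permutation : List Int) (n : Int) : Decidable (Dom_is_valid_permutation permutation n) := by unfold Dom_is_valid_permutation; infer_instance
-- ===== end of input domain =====

-- B replaces A's three separate checks (length, range scan, set-size) by one comparison of
-- sorted(permutation) with the canonical list 1..n (idiomatic; not claimed faster).

-- ===== PORT A =====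
def is_valid_permutation (permutation : List Int) (n : Int) : Bool :=
  if (permutation.length : Int) ≠ n then false
  else if permutation.any (fun x => decide (x < 1) || decide (x > n)) then false
  else if PySem.Set.len (PySem.Set.ofList permutation) ≠ n then false
  else true

-- ===== PORT B =====
def is_valid_permutation_alt (permutation : List Int) (n : Int) : Bool :=
  if (permutation.length : Int) ≠ n then false
  else PySem.List.sorted permutation (fun x => x) false == PySem.List.pyRange 1 (n + 1) 1

-- ===== PRECONDITION & SPEC =====
def Spec_is_valid_permutation (permutation : List Int) (n : Int) (out : Bool) : Prop := out = is_valid_permutation_alt permutation n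
instance (permutation : List Int) (n : Int) (out : Bool) : Decidable (Spec_is_valid_permutation permutation n out) := by unfold Spec_is_valid_permutation; infer_instance

-- ===== CLAIM (what is proved, stated in full; the proofs are below) =====
def Claim_equal_is_valid_permutation : Prop := ∀ (permutation : List Int) (n : Int), Dom_is_valid_permutation permutation n → Spec_is_valid_permutation permutation n (is_valid_permutation permutation n)

-- ===== LEMMAS AND PROOFS =====

-- set(xs) keeps a subsequence of xs (first occurrences)
theorem pvOfList_sublist (xs : List Int) : (PySem.Set.ofList xs).Sublist xs := by
  induction xs with
  | nil => simp [PySem.Set.ofList, PySem.Set.empty]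
  | cons x xs ih =>
    rw [PySem.Set.ofList_cons]
    exact List.Sublist.cons₂ x (List.Sublist.trans List.filter_sublist ih)

theorem pvNodup_of_len (xs : List Int)
    (h : (PySem.Set.ofList xs).length = xs.length) : xs.Nodup := by
  have := (pvOfList_sublist xs).eq_of_length h
  rw [← this]; exact PySem.Set.nodup_ofList xs

-- the core equivalence behind both validity tests, under the length check
theorem pvKey (p : List Int) (n : Int) (hn : (p.length : Int) = n) :
    ((¬ p.any (fun x => decide (x < 1) || decide (x > n))) ∧
      (PySem.Set.ofList p).length = p.length)
    ↔ p.Perm (PySem.List.pyRange 1 (n + 1) 1) := by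
  constructor
  · rintro ⟨hrange, hlen⟩
    have hnd : p.Nodup := pvNodup_of_len p hlen
    have hsub : p ⊆ PySem.List.pyRange 1 (n + 1) 1 := by
      intro x hx
      rw [PySem.List.mem_pyRange_one]
      simp only [List.any_eq_true, not_exists, not_and] at hrange
      have := hrange x hx
      simp at this
      omega
    have hsp := hnd.subperm hsub
    refine hsp.perm_of_length_le ?_
    rw [PySem.List.length_pyRange_one]
    omega
  · intro hperm
    have hnd : p.Nodup := hperm.nodup_iff.mpr (PySem.List.nodup_pyRange_one 1 (n + 1))
    refine ⟨?_, by rw [PySem.Set.ofList_eq_self_of_nodup p hnd]⟩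
    simp only [List.any_eq_true, not_exists, not_and]
    intro x hx
    have := PySem.List.mem_pyRange_one.mp (hperm.mem_iff.mp hx)
    simp
    omega

theorem pvSorted_ne (p : List Int) (n : Int)
    (hperm : ¬ p.Perm (PySem.List.pyRange 1 (n + 1) 1)) :
    ((PySem.List.sorted p (fun x => x) false) == PySem.List.pyRange 1 (n + 1) 1) = false := by
  rw [beq_eq_false_iff_ne]
  intro hsort
  exact hperm (hsort ▸ (PySem.List.sorted_perm p (fun x => x) false).symm)

-- ===== VERDICT (by name: the statement is the Claim_ definition above) =====
theorem is_valid_permutation_spec : Claim_equal_is_valid_permutation := by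
  intro p n _
  unfold Spec_is_valid_permutation is_valid_permutation is_valid_permutation_alt
  by_cases hlen : (p.length : Int) = n
  · rw [if_neg (not_not_intro hlen), if_neg (not_not_intro hlen)]
    by_cases hperm : p.Perm (PySem.List.pyRange 1 (n + 1) 1)
    · have h := (pvKey p n hlen).mpr hperm
      rw [if_neg h.1,
        if_neg (not_not_intro (show PySem.Set.len (PySem.Set.ofList p) = n by
          simp [PySem.Set.len, h.2, hlen])),
        PySem.List.sorted_eq_of_perm_of_pairwise_lt p _ (fun x => x) hperm.symm
          (PySem.List.pairwise_lt_pyRange_one 1 (n + 1))]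
      simp
    · rw [pvSorted_ne p n hperm]
      have h := (pvKey p n hlen).not.mpr hperm
      by_cases hany : p.any (fun x => decide (x < 1) || decide (x > n)) = true
      · rw [if_pos hany]
      · have hl : (PySem.Set.ofList p).length ≠ p.length := by tauto
        rw [if_neg hany,
          if_pos (show PySem.Set.len (PySem.Set.ofList p) ≠ n by
            simp only [PySem.Set.len]; omega)]
  · simp [hlen]
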